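-- pv_equiv track=rewrite | github.com/benoh20/dxp | powerbuilder/chat/agents/export.py | _strip_inline_paid_media
-- ===== SOURCE A (Python) =====
-- def _strip_inline_paid_media(text: str) -> str:
--     """
--     Remove the `### Paid Media Plan` block from a Markdown chunk.
--
--     The narrative formatter in chat/agents/paid_media.py emits a full markdown
--     block, including a pipe-delimited table, that the LLM may keep verbatim
--     inside the Budget Estimate section. _add_prose drops table rows silently,
--     so leaving the block in would yield a half-rendered duplicate. We strip
--     everything from the `### Paid Media Plan` heading through the next
--     `## ` (next H2) or `### ` (next H3) or end of text — whichever comes first.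
--     """
--     if "### Paid Media Plan" not in text:
--         return text
--     lines = text.splitlines()
--     out: list = []
--     skipping = False
--     for line in lines:
--         s = line.strip()
--         if not skipping and s.startswith("### Paid Media Plan"):
--             skipping = True
--             continue
--         if skipping:
--             # Stop skipping at the next H2 or sibling H3.
--             if s.startswith("## ") or (s.startswith("### ") and not s.startswith("### Paid Media Plan")):
--                 skipping = False
--                 out.append(line)
--         else:
--             out.append(line)
--     return "\n".join(out)
-- ===== SOURCE B (Python) =====
-- def _strip_inline_paid_media(text: str) -> str:
--     """Staged rewrite: instead of a stateful skip over the lines, classify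
--     every line (plan heading / other heading / body), take a prefix scan of
--     the latest heading event, and keep lines by a declarative predicate:
--
--     a line survives iff it is a non-plan heading, or it is a body line whose
--     nearest preceding heading event is not a Paid Media Plan heading.
--     """
--     if "### Paid Media Plan" not in text:
--         return text
--
--     PLAN, TERM, BODY = 0, 1, 2
--
--     def classify(line):
--         s = line.strip()
--         if s.startswith("### Paid Media Plan"):
--             return PLAN
--         if s.startswith("## ") or s.startswith("### "):
--             return TERM
--         return BODY
--
--     lines = text.splitlines()
--     kinds = [classify(l) for l in lines]
--
--     # prefix scan: latest heading event at or before each position (TERM before any)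
--     events = []
--     e = TERM
--     for k in kinds:
--         if k != BODY:
--             e = k
--         events.append(e)
--
--     kept = [l for l, k, e in zip(lines, kinds, events)
--             if k == TERM or (k == BODY and e == TERM)]
--     return "\n".join(kept)
-- ===== Notes on version B (the rewrite author's own statement) =====
-- stated objective: alternative
-- what changed: Replaces A's single stateful pass with a skipping flag by three staged passes: classify every line as plan/heading/body, prefix-scan the latest heading event, then filter with a declarative per-line keep predicate (keep non-plan headings, and body lines whose nearest preceding heading event is not a plan heading).
import Mathlib
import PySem

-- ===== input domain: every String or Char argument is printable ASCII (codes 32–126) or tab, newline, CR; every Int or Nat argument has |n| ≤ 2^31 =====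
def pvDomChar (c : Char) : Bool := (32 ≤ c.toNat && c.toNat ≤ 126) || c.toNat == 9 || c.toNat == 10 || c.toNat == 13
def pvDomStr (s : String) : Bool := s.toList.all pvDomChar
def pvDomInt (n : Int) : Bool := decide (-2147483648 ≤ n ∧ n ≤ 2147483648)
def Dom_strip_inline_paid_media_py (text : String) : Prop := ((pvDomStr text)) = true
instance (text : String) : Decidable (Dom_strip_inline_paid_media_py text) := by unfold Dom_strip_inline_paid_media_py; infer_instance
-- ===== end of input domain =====

-- B replaces A's stateful skip pass by staged passes: classify lines, prefix-scan the
-- latest heading event, then filter with a declarative keep predicate (objective: alternative).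

-- ===== PORT A =====
-- state: (out, skipping)
def aStep (st : List String × Bool) (line : String) : List String × Bool :=
  let s := PySem.Str.strip line
  if !st.2 && PySem.Str.startswith s "### Paid Media Plan" then
    (st.1, true)
  else if st.2 then
    if PySem.Str.startswith s "## " ||
        (PySem.Str.startswith s "### " && !PySem.Str.startswith s "### Paid Media Plan") then
      (st.1 ++ [line], false)
    else st
  else
    (st.1 ++ [line], false)

def strip_inline_paid_media_py (text : String) : String :=
  if PySem.Str.isIn "### Paid Media Plan" text = false then text
  else
    let lines := PySem.Str.splitlines text
    PySem.Str.join "\n" (lines.foldl aStep ([], false)).1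

-- ===== PORT B =====
-- PLAN = 0, TERM = 1, BODY = 2
def bClassify (line : String) : Nat :=
  let s := PySem.Str.strip line
  if PySem.Str.startswith s "### Paid Media Plan" then 0
  else if PySem.Str.startswith s "## " || PySem.Str.startswith s "### " then 1
  else 2

-- prefix scan: `events` list of the latest heading event at or before each position
def bScan (ks : List Nat) (e : Nat) : List Nat :=
  match ks with
  | [] => []
  | k :: r => let e' := if k ≠ 2 then k else e
              e' :: bScan r e'

def strip_inline_paid_media_py_alt (text : String) : String :=
  if PySem.Str.isIn "### Paid Media Plan" text = false then text
  else
    let lines := PySem.Str.splitlines text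
    let kinds := lines.map bClassify
    let events := bScan kinds 1
    let kept := ((lines.zip (kinds.zip events)).filter
        (fun p => p.2.1 == 1 || (p.2.1 == 2 && p.2.2 == 1))).map (·.1)
    PySem.Str.join "\n" kept

-- ===== PRECONDITION & SPEC =====
def Spec_strip_inline_paid_media_py (text : String) (out : String) : Prop := out = strip_inline_paid_media_py_alt text
instance (text : String) (out : String) : Decidable (Spec_strip_inline_paid_media_py text out) := by unfold Spec_strip_inline_paid_media_py; infer_instance

-- ===== CLAIM (what is proved, stated in full; the proofs are below) =====
def Claim_equal_strip_inline_paid_media_py : Prop := ∀ (text : String), Dom_strip_inline_paid_media_py text → Spec_strip_inline_paid_media_py text (strip_inline_paid_media_py text)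

-- ===== LEMMAS AND PROOFS =====

-- recursive specification of B's staged pipeline: K ls e = lines kept from ls given
-- the latest heading event before ls is e
def K (ls : List String) (e : Nat) : List String :=
  match ls with
  | [] => []
  | l :: r =>
    let k := bClassify l
    let e' := if k ≠ 2 then k else e
    (if k == 1 || (k == 2 && e' == 1) then [l] else []) ++ K r e'

theorem zipFilter_eq_K (ls : List String) (e : Nat) :
    ((ls.zip ((ls.map bClassify).zip (bScan (ls.map bClassify) e))).filter
        (fun p => p.2.1 == 1 || (p.2.1 == 2 && p.2.2 == 1))).map (·.1) = K ls e := by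
  induction ls generalizing e with
  | nil => simp [K, bScan]
  | cons l r ih =>
    rw [List.map_cons, bScan, List.zip_cons_cons, List.zip_cons_cons, List.filter_cons, K]
    cases hk : (bClassify l == 1 ||
        (bClassify l == 2 && (if bClassify l ≠ 2 then bClassify l else e) == 1)) with
    | false => rw [if_neg (by simp)]; simpa using ih _
    | true => rw [if_pos (by simp)]; simpa [hk] using ih _

-- a Paid Media Plan heading never starts with "## "
theorem plan_not_h2 (s : List Char) (hp : PySem.Chars.startswith s "### Paid Media Plan".toList = true) :
    PySem.Chars.startswith s "## ".toList = false := by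
  by_contra h2
  simp only [Bool.not_eq_false] at h2
  rw [PySem.Chars.startswith_iff] at hp h2
  rcases List.prefix_or_prefix_of_prefix h2 hp with h | h
  · revert h; decide
  · revert h; decide

-- A's fold computes K; the flag b corresponds to event (if b then 0 else 1)
theorem foldl_eq_K (ls : List String) : ∀ (acc : List String) (b : Bool),
    (List.foldl aStep (acc, b) ls).1 = acc ++ K ls (if b then 0 else 1) := by
  induction ls with
  | nil => intro acc b; simp [K]
  | cons l r ih =>
    intro acc b
    rw [List.foldl_cons, K]
    set s := PySem.Str.strip l with hs
    by_cases hp : PySem.Str.startswith s "### Paid Media Plan" = true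
    · -- classify = 0 (plan): line dropped, state becomes skipping
      have h2 : PySem.Str.startswith s "## " = false := by
        rw [PySem.Str.startswith_eq] at hp ⊢
        exact plan_not_h2 _ hp
      have hc : bClassify l = 0 := by
        unfold bClassify; rw [← hs, if_pos hp]
      have hstep : aStep (acc, b) l = (acc, true) := by
        cases b <;> simp only [aStep, ← hs, hp, h2] <;> simp
      rw [hstep, ih, hc]
      simp
    · have hpf : PySem.Str.startswith s "### Paid Media Plan" = false := by
        simpa using hp
      by_cases ht : (PySem.Str.startswith s "## " || PySem.Str.startswith s "### ") = true
      · -- classify = 1 (heading): line kept, state resets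
        have hc : bClassify l = 1 := by
          unfold bClassify; rw [← hs, if_neg hp, if_pos ht]
        have hstep : aStep (acc, b) l = (acc ++ [l], false) := by
          cases b
          · simp only [aStep, ← hs, hpf]; simp
          · simp only [aStep, ← hs, hpf]; simp
            intro h; simpa [h] using ht
        rw [hstep, ih, hc]
        simp
      · -- classify = 2 (body): kept iff not skipping, state unchanged
        simp only [Bool.or_eq_true, not_or, Bool.not_eq_true] at ht
        have hc : bClassify l = 2 := by
          unfold bClassify
          rw [← hs, if_neg hp, if_neg (by rw [ht.1, ht.2]; simp)]
        have hstep : aStep (acc, b) l = (if b then acc else acc ++ [l], b) := by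
          cases b <;> simp only [aStep, ← hs, hpf, ht.1, ht.2] <;> simp
        rw [hstep, hc]
        cases b <;> simp [ih]

-- ===== VERDICT (by name: the statement is the Claim_ definition above) =====
theorem strip_inline_paid_media_py_spec : Claim_equal_strip_inline_paid_media_py := by
  intro text _
  unfold Spec_strip_inline_paid_media_py strip_inline_paid_media_py strip_inline_paid_media_py_alt
  by_cases h : PySem.Str.isIn "### Paid Media Plan" text = false
  · rw [if_pos h, if_pos h]
  · rw [if_neg h, if_neg h]
    simp only [zipFilter_eq_K, foldl_eq_K, List.nil_append, if_neg Bool.false_ne_true]
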